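-- pv_equiv track=rewrite | github.com/ShashidharGadepalli/MediQ | src/augment_training_data.py | augment_report_abbreviations
-- ===== SOURCE A (Python) =====
-- def augment_report_abbreviations(text):
--     """Replace full names with abbreviations."""
--     replacements = {
--         'Haemoglobin': 'Hb',
--         'Total RBC': 'RBC',
--         'Platelets': 'PLT',
--         'Neutrophils': 'Neut',
--         'Lymphocytes': 'Lymph',
--         'Monocytes': 'Mono',
--         'Eosinophils': 'Eos',
--         'Haematocrit': 'Hct'
--     }
--
--     augmented = text
--     for full, abbrev in replacements.items():
--         augmented = augmented.replace(full, abbrev)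
--
--     return augmented
-- ===== SOURCE B (Python) =====
-- def augment_report_abbreviations(text):
--     """Replace full names with abbreviations (single left-to-right pass)."""
--     table = [
--         ('Haemoglobin', 'Hb'),
--         ('Total RBC', 'RBC'),
--         ('Platelets', 'PLT'),
--         ('Neutrophils', 'Neut'),
--         ('Lymphocytes', 'Lymph'),
--         ('Monocytes', 'Mono'),
--         ('Eosinophils', 'Eos'),
--         ('Haematocrit', 'Hct'),
--     ]
--     out = []
--     i = 0
--     n = len(text)
--     while i < n:
--         for full, abbrev in table:
--             if text.startswith(full, i):
--                 out.append(abbrev)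
--                 i += len(full)
--                 break
--         else:
--             out.append(text[i])
--             i += 1
--     return ''.join(out)
-- ===== Notes on version B (the rewrite author's own statement) =====
-- stated objective: alternative
-- what changed: Replaces eight sequential full-text str.replace passes with one left-to-right scan that at each position tries the keys in order, emits the abbreviation and jumps past the match (or copies one character), building the output in a single pass.
import Mathlib
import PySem

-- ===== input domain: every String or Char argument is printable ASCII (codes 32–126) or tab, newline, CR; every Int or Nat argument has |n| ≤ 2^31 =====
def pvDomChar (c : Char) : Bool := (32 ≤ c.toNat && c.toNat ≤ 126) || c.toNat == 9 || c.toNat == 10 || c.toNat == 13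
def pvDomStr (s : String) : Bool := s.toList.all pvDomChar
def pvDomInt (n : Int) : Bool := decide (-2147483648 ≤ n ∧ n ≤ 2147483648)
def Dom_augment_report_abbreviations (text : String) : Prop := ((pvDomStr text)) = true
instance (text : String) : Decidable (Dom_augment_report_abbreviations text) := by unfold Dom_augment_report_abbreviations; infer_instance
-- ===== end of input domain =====

-- B replaces A's eight sequential full-text str.replace passes by one left-to-right scan
-- that at each position tries the keys in order (objective: alternative single-pass algorithm).

-- ===== PORT A =====
-- A: build the replacements dict, then fold str.replace over its items.
def augment_report_abbreviations (text : String) : String :=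
  let replacements : PySem.Dict String String := PySem.Dict.ofList
    [("Haemoglobin", "Hb"), ("Total RBC", "RBC"), ("Platelets", "PLT"),
     ("Neutrophils", "Neut"), ("Lymphocytes", "Lymph"), ("Monocytes", "Mono"),
     ("Eosinophils", "Eos"), ("Haematocrit", "Hct")]
  replacements.items.foldl (fun augmented fa => PySem.Str.replace augmented fa.1 fa.2) text

-- ===== PORT B =====
-- B's table, as (full, abbrev) pairs of char lists.
def pvTbl : List (List Char × List Char) :=
  [("Haemoglobin".toList, "Hb".toList), ("Total RBC".toList, "RBC".toList),
   ("Platelets".toList, "PLT".toList), ("Neutrophils".toList, "Neut".toList),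
   ("Lymphocytes".toList, "Lymph".toList), ("Monocytes".toList, "Mono".toList),
   ("Eosinophils".toList, "Eos".toList), ("Haematocrit".toList, "Hct".toList)]

-- B's while-loop over index i: at each position try the table entries in order
-- (the for/else with text.startswith(full, i)); on a match emit the abbreviation and
-- advance by len(full), else copy one character.  The growing `out` list joined at the
-- end corresponds to the appends here; the index i corresponds to the list suffix.
def pvScan (K : List (List Char × List Char)) (s : List Char) : List Char :=
  match s with
  | [] => []
  | c :: cs =>
    match K.find? (fun p => p.1.isPrefixOf (c :: cs)) with
    | some p => p.2 ++ pvScan K (cs.drop (p.1.length - 1))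
    | none => c :: pvScan K cs
  termination_by s.length
  decreasing_by
  · simp only [List.length_cons, List.length_drop]; omega
  · simp

def augment_report_abbreviations_alt (text : String) : String :=
  String.ofList (pvScan pvTbl text.toList)

-- ===== PRECONDITION & SPEC =====
def Spec_augment_report_abbreviations (text : String) (out : String) : Prop := out = augment_report_abbreviations_alt text
instance (text : String) (out : String) : Decidable (Spec_augment_report_abbreviations text out) := by unfold Spec_augment_report_abbreviations; infer_instance

-- ===== CLAIM (what is proved, stated in full; the proofs are below) =====
def Claim_equal_augment_report_abbreviations : Prop := ∀ (text : String), Dom_augment_report_abbreviations text → Spec_augment_report_abbreviations text (augment_report_abbreviations text)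

-- ===== LEMMAS AND PROOFS =====

-- Recursive characterisation of one Python str.replace pass (nonempty needle).
def pvRepl (k v : List Char) (s : List Char) : List Char :=
  match s with
  | [] => []
  | c :: cs =>
    if k.isPrefixOf (c :: cs) then v ++ pvRepl k v (cs.drop (k.length - 1))
    else c :: pvRepl k v cs
  termination_by s.length
  decreasing_by
  · simp only [List.length_cons, List.length_drop]; omega
  · simp

theorem pvScan_cons (K : List (List Char × List Char)) (c : Char) (cs : List Char) :
    pvScan K (c :: cs) =
      match K.find? (fun p => p.1.isPrefixOf (c :: cs)) with
      | some p => p.2 ++ pvScan K (cs.drop (p.1.length - 1))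
      | none => c :: pvScan K cs := by
  rw [pvScan]

theorem pvRepl_cons (k v : List Char) (c : Char) (cs : List Char) :
    pvRepl k v (c :: cs) =
      if k.isPrefixOf (c :: cs) then v ++ pvRepl k v (cs.drop (k.length - 1))
      else c :: pvRepl k v cs := by
  rw [pvRepl]

theorem pv_go_eq (k v : List Char) (hk : k ≠ []) :
    ∀ (fuel : Nat) (l acc : List Char), l.length ≤ fuel →
      PySem.Chars.replace.go k v fuel l acc = acc.reverse ++ pvRepl k v l := by
  intro fuel
  induction fuel with
  | zero =>
    intro l acc h
    have hl : l = [] := List.eq_nil_of_length_eq_zero (Nat.le_zero.mp h)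
    subst hl
    simp [PySem.Chars.replace.go, pvRepl]
  | succ m ih =>
    intro l acc h
    cases l with
    | nil => simp [PySem.Chars.replace.go, pvRepl]
    | cons c t =>
      rw [PySem.Chars.replace.go]
      have hkl : k.length - 1 + 1 = k.length :=
        Nat.succ_pred_eq_of_pos (List.length_pos_iff.mpr hk)
      by_cases hp : k.isPrefixOf (c :: t) = true
      · rw [if_pos hp]
        have hdrop : List.drop k.length (c :: t) = List.drop (k.length - 1) t := by
          conv_lhs => rw [← hkl]
          rw [List.drop_succ_cons]
        have hlen2 : (List.drop k.length (c :: t)).length ≤ m := by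
          rw [List.length_drop]
          simp only [List.length_cons] at h ⊢
          have hk0 : 0 < k.length := List.length_pos_iff.mpr hk
          omega
        rw [ih _ _ hlen2, pvRepl_cons, if_pos hp, hdrop]
        simp only [List.reverse_append, List.reverse_reverse, List.append_assoc]
      · rw [if_neg hp]
        have hlen2 : t.length ≤ m := by simp at h; omega
        rw [ih _ _ hlen2, pvRepl_cons, if_neg hp]
        simp

theorem pvReplace_eq (k v s : List Char) (hk : k ≠ []) :
    PySem.Chars.replace s k v = pvRepl k v s := by
  unfold PySem.Chars.replace
  rw [if_neg (by simp [List.isEmpty_iff, hk]), pv_go_eq k v hk s.length s [] le_rfl]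
  simp

theorem pvScan_nil_table (u : List Char) : pvScan [] u = u := by
  induction u with
  | nil => rw [pvScan]
  | cons c cs ih => rw [pvScan_cons]; simp [ih]

theorem pvScan_skip (K : List (List Char × List Char)) (t : List Char) :
    ∀ v : List Char, (∀ p < v.length, ∀ kv ∈ K, ¬ (kv.1 <+: (v.drop p ++ t))) →
      pvScan K (v ++ t) = v ++ pvScan K t := by
  intro v
  induction v with
  | nil => intro _; simp
  | cons c v' ih =>
    intro h
    rw [List.cons_append, pvScan_cons]
    have hnone : (K.find? (fun p => p.1.isPrefixOf (c :: (v' ++ t)))) = none := by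
      rw [List.find?_eq_none]
      intro kv hm
      have := h 0 (by simp) kv hm
      simpa [List.isPrefixOf_iff_prefix] using this
    rw [hnone]
    have ih' := ih (fun p hp kv hm => by
      have := h (p + 1) (by simpa using Nat.succ_lt_succ hp) kv hm
      simpa using this)
    simp [ih']

theorem pvRepl_skip (k v t : List Char) :
    ∀ u : List Char, (∀ p < u.length, ¬ (k <+: (u.drop p ++ t))) →
      pvRepl k v (u ++ t) = u ++ pvRepl k v t := by
  intro u
  induction u with
  | nil => intro _; simp
  | cons d u' ih =>
    intro h
    rw [List.cons_append, pvRepl_cons]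
    have hneg : ¬ (k.isPrefixOf (d :: (u' ++ t)) = true) := by
      have := h 0 (by simp)
      simpa [List.isPrefixOf_iff_prefix] using this
    rw [if_neg hneg]
    have ih' := ih (fun p hp => by
      have := h (p + 1) (by simpa using Nat.succ_lt_succ hp)
      simpa using this)
    simp [ih']

theorem pvRepl_bridge (k v : List Char) (K : List (List Char × List Char))
    (hF : ∀ kv ∈ K, ∀ q < kv.1.length, 1 ≤ q →
      ¬ (v <+: kv.1.drop q) ∧ ¬ (kv.1.drop q <+: v)) :
    ∀ (n : Nat) (u : List Char), u.length ≤ n → ∀ kv ∈ K, ∀ q, 1 ≤ q → q < kv.1.length →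
      kv.1.drop q <+: pvRepl k v u → kv.1.drop q <+: u := by
  intro n
  induction n with
  | zero =>
    intro u hu kv hm q hq1 hq2 hpre
    have hunil : u = [] := List.eq_nil_of_length_eq_zero (Nat.le_zero.mp hu)
    subst hunil
    simpa [pvRepl] using hpre
  | succ m ih =>
    intro u hu kv hm q hq1 hq2 hpre
    cases u with
    | nil => simpa [pvRepl] using hpre
    | cons c cs =>
      rw [pvRepl_cons] at hpre
      by_cases hp : k.isPrefixOf (c :: cs) = true
      · rw [if_pos hp] at hpre
        exfalso
        have hvpre : v <+: v ++ pvRepl k v (cs.drop (k.length - 1)) := List.prefix_append _ _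
        rcases Nat.le_total (kv.1.drop q).length v.length with hle | hle
        · exact (hF kv hm q hq2 hq1).2 (List.prefix_of_prefix_length_le hpre hvpre hle)
        · exact (hF kv hm q hq2 hq1).1 (List.prefix_of_prefix_length_le hvpre hpre hle)
      · rw [if_neg hp] at hpre
        rcases hw : kv.1.drop q with _ | ⟨w0, w'⟩
        · exact List.nil_prefix
        · rw [hw, List.cons_prefix_cons] at hpre
          obtain ⟨rfl, hw'⟩ := hpre
          have hdq : kv.1.drop (q + 1) = w' := by
            have h1 : (kv.1.drop q).drop 1 = kv.1.drop (q + 1) := by rw [List.drop_drop]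
            rw [← h1, hw]
            rfl
          by_cases hw'nil : w' = []
          · subst hw'nil
            exact (List.cons_prefix_cons).mpr ⟨rfl, List.nil_prefix⟩
          · have hq2' : q + 1 < kv.1.length := by
              by_contra hcon
              exact hw'nil (hdq ▸ List.drop_eq_nil_iff.mpr (by omega))
            have hcs : cs.length ≤ m := by simp at hu; omega
            have hrec := ih cs hcs kv hm (q + 1) (by omega) hq2' (by rw [hdq]; exact hw')
            rw [hdq] at hrec
            exact (List.cons_prefix_cons).mpr ⟨rfl, hrec⟩

theorem pvFind_stable :
    ∀ (K : List (List Char × List Char)),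
      K.Pairwise (fun a b => ¬ a.1 <+: b.1 ∧ ¬ b.1 <+: a.1) →
      ∀ (s t : List Char) (kv : List Char × List Char),
        K.find? (fun p => p.1.isPrefixOf s) = some kv → kv.1 <+: t →
        K.find? (fun p => p.1.isPrefixOf t) = some kv := by
  intro K
  induction K with
  | nil => intro _ s t kv hfind _; simp at hfind
  | cons a K' ih =>
    intro hpw s t kv hfind hkt
    rw [List.pairwise_cons] at hpw
    obtain ⟨hhead, htail⟩ := hpw
    rw [List.find?_cons] at hfind
    by_cases ha : a.1.isPrefixOf s = true
    · rw [ha] at hfind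
      have : a = kv := by injection hfind
      subst this
      have hat : a.1.isPrefixOf t = true := List.isPrefixOf_iff_prefix.mpr hkt
      rw [List.find?_cons, hat]
    · have ha0 : a.1.isPrefixOf s = false := Bool.eq_false_iff.mpr ha
      rw [ha0] at hfind
      have hkvmem := List.mem_of_find?_eq_some hfind
      have hkvs : kv.1 <+: s := by
        have := List.find?_some hfind
        rwa [List.isPrefixOf_iff_prefix] at this
      have hat0 : a.1.isPrefixOf t = false := by
        rw [← Bool.not_eq_true, List.isPrefixOf_iff_prefix]
        intro hatp
        rcases Nat.le_total a.1.length kv.1.length with hle | hle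
        · exact ha (by
            rw [List.isPrefixOf_iff_prefix]
            exact (List.prefix_of_prefix_length_le hatp hkt hle).trans hkvs)
        · exact (hhead kv hkvmem).2 (List.prefix_of_prefix_length_le hkt hatp hle)
      rw [List.find?_cons, hat0]
      exact ih htail s t kv hfind hkt

theorem pvStep (k v : List Char) (K : List (List Char × List Char))
    (hne : ∀ kv ∈ K, kv.1 ≠ [])
    (hlen : ∀ kv ∈ K, v.length < kv.1.length)
    (hG : ∀ kv ∈ K, ∀ q < v.length, ¬ (v.drop q <+: kv.1))
    (hF : ∀ kv ∈ K, ∀ q < kv.1.length, 1 ≤ q →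
      ¬ (v <+: kv.1.drop q) ∧ ¬ (kv.1.drop q <+: v))
    (hK : ∀ kv ∈ K, ∀ q < kv.1.length, 1 ≤ q →
      ¬ (k <+: kv.1.drop q) ∧ ¬ (kv.1.drop q <+: k))
    (hpw : K.Pairwise (fun a b => ¬ a.1 <+: b.1 ∧ ¬ b.1 <+: a.1)) :
    ∀ (n : Nat) (s : List Char), s.length ≤ n →
      pvScan K (pvRepl k v s) = pvScan ((k, v) :: K) s := by
  intro n
  induction n with
  | zero =>
    intro s hs
    have : s = [] := List.eq_nil_of_length_eq_zero (Nat.le_zero.mp hs)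
    subst this
    simp [pvRepl, pvScan]
  | succ m ih =>
    intro s hs
    cases s with
    | nil => simp [pvRepl, pvScan]
    | cons c cs =>
      rw [pvRepl_cons]
      by_cases hA : k.isPrefixOf (c :: cs) = true
      · rw [if_pos hA]
        have hskip : pvScan K (v ++ pvRepl k v (cs.drop (k.length - 1))) =
            v ++ pvScan K (pvRepl k v (cs.drop (k.length - 1))) := by
          apply pvScan_skip
          intro p hp kv hm hpre
          have hdp : v.drop p <+: v.drop p ++ pvRepl k v (cs.drop (k.length - 1)) :=
            List.prefix_append _ _
          have hle : (v.drop p).length ≤ kv.1.length := by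
            rw [List.length_drop]
            have := hlen kv hm
            omega
          exact hG kv hm p hp (List.prefix_of_prefix_length_le hdp hpre hle)
        rw [hskip]
        have hlen2 : (cs.drop (k.length - 1)).length ≤ m := by
          rw [List.length_drop]
          simp at hs
          omega
        rw [ih _ hlen2, pvScan_cons, List.find?_cons]
        have hA1 : ((k, v) : List Char × List Char).1.isPrefixOf (c :: cs) = true := hA
        rw [hA1]
      · cases hF2 : K.find? (fun p => p.1.isPrefixOf (c :: cs)) with
        | none =>
          rw [if_neg hA]
          have hnone2 : K.find? (fun p => p.1.isPrefixOf (c :: pvRepl k v cs)) = none := by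
            rw [List.find?_eq_none]
            intro kv hm hpre
            rw [List.isPrefixOf_iff_prefix] at hpre
            have hkvne := hne kv hm
            have hnot : ¬ (kv.1 <+: c :: cs) := by
              have := List.find?_eq_none.mp hF2 kv hm
              rwa [List.isPrefixOf_iff_prefix] at this
            rcases hkv : kv.1 with _ | ⟨a, w⟩
            · exact hkvne hkv
            · rw [hkv, List.cons_prefix_cons] at hpre
              obtain ⟨rfl, hw⟩ := hpre
              by_cases hwnil : w = []
              · subst hwnil
                exact hnot (by rw [hkv]; exact List.cons_prefix_cons.mpr ⟨rfl, List.nil_prefix⟩)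
              · have hlen1 : 1 < kv.1.length := by
                  rw [hkv, List.length_cons]
                  have := List.length_pos_iff.mpr hwnil
                  omega
                have hd1 : kv.1.drop 1 = w := by rw [hkv]; rfl
                have hbr := pvRepl_bridge k v K hF cs.length cs le_rfl kv hm 1 le_rfl hlen1
                  (by rw [hd1]; exact hw)
                rw [hd1] at hbr
                exact hnot (by rw [hkv]; exact List.cons_prefix_cons.mpr ⟨rfl, hbr⟩)
          have hcs : cs.length ≤ m := by simp at hs; omega
          have hA0 : ((k, v) : List Char × List Char).1.isPrefixOf (c :: cs) = false :=
            Bool.eq_false_iff.mpr hA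
          rw [pvScan_cons, hnone2, ih cs hcs, pvScan_cons (K := (k, v) :: K),
            List.find?_cons, hA0, hF2]
        | some kv =>
          rw [if_neg hA]
          have hkvmem := List.mem_of_find?_eq_some hF2
          have hkvpre : kv.1 <+: c :: cs := by
            have := List.find?_some hF2
            rwa [List.isPrefixOf_iff_prefix] at this
          obtain ⟨r, hr⟩ := hkvpre
          have hkvne := hne kv hkvmem
          have hA' : ¬ (k <+: c :: cs) := fun hc => hA (List.isPrefixOf_iff_prefix.mpr hc)
          rcases hkv : kv.1 with _ | ⟨a, kt⟩
          · exact absurd hkv hkvne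
          obtain ⟨hac, hktr⟩ : a = c ∧ kt ++ r = cs := by
            rw [hkv] at hr
            simpa using hr
          rw [hac] at hkv
          have hceq : c :: cs = kv.1 ++ r := by rw [hkv, List.cons_append, hktr]
          have hreplskip : pvRepl k v (kv.1 ++ r) = kv.1 ++ pvRepl k v r := by
            apply pvRepl_skip
            intro p hp hkp
            cases p with
            | zero =>
              apply hA'
              rw [hceq]
              simpa using hkp
            | succ p' =>
              have hKk := hK kv hkvmem (p' + 1) hp (by omega)
              rcases Nat.le_total k.length (kv.1.drop (p' + 1)).length with hle | hle
              · exact hKk.1 (List.prefix_of_prefix_length_le hkp (List.prefix_append _ _) hle)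
              · exact hKk.2 (List.prefix_of_prefix_length_le (List.prefix_append _ _) hkp hle)
          have hL : c :: pvRepl k v cs = kv.1 ++ pvRepl k v r := by
            rw [← hreplskip, ← hceq, pvRepl_cons, if_neg hA]
          rw [hL, hkv, List.cons_append, pvScan_cons]
          have hfind2 : K.find? (fun p => p.1.isPrefixOf (c :: (kt ++ pvRepl k v r))) = some kv := by
            apply pvFind_stable K hpw (c :: cs) _ kv hF2
            rw [hkv, ← List.cons_append]
            exact List.prefix_append _ _
          rw [hfind2]
          show kv.2 ++ pvScan K (List.drop (kv.1.length - 1) (kt ++ pvRepl k v r)) =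
            pvScan ((k, v) :: K) (c :: cs)
          have hdropeq : (kt ++ pvRepl k v r).drop (kv.1.length - 1) = pvRepl k v r := by
            rw [hkv, List.length_cons, Nat.add_sub_cancel, List.drop_left]
          rw [hdropeq]
          have hrlen : r.length ≤ m := by
            have hlens : (c :: cs).length = kv.1.length + r.length := by
              rw [hceq, List.length_append]
            have hkv1pos : 0 < kv.1.length := List.length_pos_iff.mpr hkvne
            simp only [List.length_cons] at hlens hs
            omega
          have hcsr : cs.drop (kv.1.length - 1) = r := by
            rw [← hktr, hkv, List.length_cons, Nat.add_sub_cancel, List.drop_left]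
          have hA0 : ((k, v) : List Char × List Char).1.isPrefixOf (c :: cs) = false :=
            Bool.eq_false_iff.mpr hA
          rw [ih r hrlen, pvScan_cons (K := (k, v) :: K), List.find?_cons, hA0, hF2]
          show kv.2 ++ pvScan ((k, v) :: K) r =
            kv.2 ++ pvScan ((k, v) :: K) (List.drop (kv.1.length - 1) cs)
          rw [hcsr]

theorem pvChain (s : List Char) :
    pvScan pvTbl s = (pvRepl "Haematocrit".toList "Hct".toList (pvRepl "Eosinophils".toList "Eos".toList (pvRepl "Monocytes".toList "Mono".toList (pvRepl "Lymphocytes".toList "Lymph".toList (pvRepl "Neutrophils".toList "Neut".toList (pvRepl "Platelets".toList "PLT".toList (pvRepl "Total RBC".toList "RBC".toList (pvRepl "Haemoglobin".toList "Hb".toList s)))))))) := by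
  calc pvScan pvTbl s
      _ = pvScan [("Total RBC".toList, "RBC".toList), ("Platelets".toList, "PLT".toList), ("Neutrophils".toList, "Neut".toList), ("Lymphocytes".toList, "Lymph".toList), ("Monocytes".toList, "Mono".toList), ("Eosinophils".toList, "Eos".toList), ("Haematocrit".toList, "Hct".toList)] (pvRepl "Haemoglobin".toList "Hb".toList s) :=
        (pvStep "Haemoglobin".toList "Hb".toList [("Total RBC".toList, "RBC".toList), ("Platelets".toList, "PLT".toList), ("Neutrophils".toList, "Neut".toList), ("Lymphocytes".toList, "Lymph".toList), ("Monocytes".toList, "Mono".toList), ("Eosinophils".toList, "Eos".toList), ("Haematocrit".toList, "Hct".toList)] (by decide) (by decide)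
          (by decide) (by decide) (by decide) (by decide) (s).length s le_rfl).symm
      _ = pvScan [("Platelets".toList, "PLT".toList), ("Neutrophils".toList, "Neut".toList), ("Lymphocytes".toList, "Lymph".toList), ("Monocytes".toList, "Mono".toList), ("Eosinophils".toList, "Eos".toList), ("Haematocrit".toList, "Hct".toList)] (pvRepl "Total RBC".toList "RBC".toList (pvRepl "Haemoglobin".toList "Hb".toList s)) :=
        (pvStep "Total RBC".toList "RBC".toList [("Platelets".toList, "PLT".toList), ("Neutrophils".toList, "Neut".toList), ("Lymphocytes".toList, "Lymph".toList), ("Monocytes".toList, "Mono".toList), ("Eosinophils".toList, "Eos".toList), ("Haematocrit".toList, "Hct".toList)] (by decide) (by decide)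
          (by decide) (by decide) (by decide) (by decide) ((pvRepl "Haemoglobin".toList "Hb".toList s)).length (pvRepl "Haemoglobin".toList "Hb".toList s) le_rfl).symm
      _ = pvScan [("Neutrophils".toList, "Neut".toList), ("Lymphocytes".toList, "Lymph".toList), ("Monocytes".toList, "Mono".toList), ("Eosinophils".toList, "Eos".toList), ("Haematocrit".toList, "Hct".toList)] (pvRepl "Platelets".toList "PLT".toList (pvRepl "Total RBC".toList "RBC".toList (pvRepl "Haemoglobin".toList "Hb".toList s))) :=
        (pvStep "Platelets".toList "PLT".toList [("Neutrophils".toList, "Neut".toList), ("Lymphocytes".toList, "Lymph".toList), ("Monocytes".toList, "Mono".toList), ("Eosinophils".toList, "Eos".toList), ("Haematocrit".toList, "Hct".toList)] (by decide) (by decide)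
          (by decide) (by decide) (by decide) (by decide) ((pvRepl "Total RBC".toList "RBC".toList (pvRepl "Haemoglobin".toList "Hb".toList s))).length (pvRepl "Total RBC".toList "RBC".toList (pvRepl "Haemoglobin".toList "Hb".toList s)) le_rfl).symm
      _ = pvScan [("Lymphocytes".toList, "Lymph".toList), ("Monocytes".toList, "Mono".toList), ("Eosinophils".toList, "Eos".toList), ("Haematocrit".toList, "Hct".toList)] (pvRepl "Neutrophils".toList "Neut".toList (pvRepl "Platelets".toList "PLT".toList (pvRepl "Total RBC".toList "RBC".toList (pvRepl "Haemoglobin".toList "Hb".toList s)))) :=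
        (pvStep "Neutrophils".toList "Neut".toList [("Lymphocytes".toList, "Lymph".toList), ("Monocytes".toList, "Mono".toList), ("Eosinophils".toList, "Eos".toList), ("Haematocrit".toList, "Hct".toList)] (by decide) (by decide)
          (by decide) (by decide) (by decide) (by decide) ((pvRepl "Platelets".toList "PLT".toList (pvRepl "Total RBC".toList "RBC".toList (pvRepl "Haemoglobin".toList "Hb".toList s)))).length (pvRepl "Platelets".toList "PLT".toList (pvRepl "Total RBC".toList "RBC".toList (pvRepl "Haemoglobin".toList "Hb".toList s))) le_rfl).symm
      _ = pvScan [("Monocytes".toList, "Mono".toList), ("Eosinophils".toList, "Eos".toList), ("Haematocrit".toList, "Hct".toList)] (pvRepl "Lymphocytes".toList "Lymph".toList (pvRepl "Neutrophils".toList "Neut".toList (pvRepl "Platelets".toList "PLT".toList (pvRepl "Total RBC".toList "RBC".toList (pvRepl "Haemoglobin".toList "Hb".toList s))))) :=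
        (pvStep "Lymphocytes".toList "Lymph".toList [("Monocytes".toList, "Mono".toList), ("Eosinophils".toList, "Eos".toList), ("Haematocrit".toList, "Hct".toList)] (by decide) (by decide)
          (by decide) (by decide) (by decide) (by decide) ((pvRepl "Neutrophils".toList "Neut".toList (pvRepl "Platelets".toList "PLT".toList (pvRepl "Total RBC".toList "RBC".toList (pvRepl "Haemoglobin".toList "Hb".toList s))))).length (pvRepl "Neutrophils".toList "Neut".toList (pvRepl "Platelets".toList "PLT".toList (pvRepl "Total RBC".toList "RBC".toList (pvRepl "Haemoglobin".toList "Hb".toList s)))) le_rfl).symm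
      _ = pvScan [("Eosinophils".toList, "Eos".toList), ("Haematocrit".toList, "Hct".toList)] (pvRepl "Monocytes".toList "Mono".toList (pvRepl "Lymphocytes".toList "Lymph".toList (pvRepl "Neutrophils".toList "Neut".toList (pvRepl "Platelets".toList "PLT".toList (pvRepl "Total RBC".toList "RBC".toList (pvRepl "Haemoglobin".toList "Hb".toList s)))))) :=
        (pvStep "Monocytes".toList "Mono".toList [("Eosinophils".toList, "Eos".toList), ("Haematocrit".toList, "Hct".toList)] (by decide) (by decide)
          (by decide) (by decide) (by decide) (by decide) ((pvRepl "Lymphocytes".toList "Lymph".toList (pvRepl "Neutrophils".toList "Neut".toList (pvRepl "Platelets".toList "PLT".toList (pvRepl "Total RBC".toList "RBC".toList (pvRepl "Haemoglobin".toList "Hb".toList s)))))).length (pvRepl "Lymphocytes".toList "Lymph".toList (pvRepl "Neutrophils".toList "Neut".toList (pvRepl "Platelets".toList "PLT".toList (pvRepl "Total RBC".toList "RBC".toList (pvRepl "Haemoglobin".toList "Hb".toList s))))) le_rfl).symm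
      _ = pvScan [("Haematocrit".toList, "Hct".toList)] (pvRepl "Eosinophils".toList "Eos".toList (pvRepl "Monocytes".toList "Mono".toList (pvRepl "Lymphocytes".toList "Lymph".toList (pvRepl "Neutrophils".toList "Neut".toList (pvRepl "Platelets".toList "PLT".toList (pvRepl "Total RBC".toList "RBC".toList (pvRepl "Haemoglobin".toList "Hb".toList s))))))) :=
        (pvStep "Eosinophils".toList "Eos".toList [("Haematocrit".toList, "Hct".toList)] (by decide) (by decide)
          (by decide) (by decide) (by decide) (by decide) ((pvRepl "Monocytes".toList "Mono".toList (pvRepl "Lymphocytes".toList "Lymph".toList (pvRepl "Neutrophils".toList "Neut".toList (pvRepl "Platelets".toList "PLT".toList (pvRepl "Total RBC".toList "RBC".toList (pvRepl "Haemoglobin".toList "Hb".toList s))))))).length (pvRepl "Monocytes".toList "Mono".toList (pvRepl "Lymphocytes".toList "Lymph".toList (pvRepl "Neutrophils".toList "Neut".toList (pvRepl "Platelets".toList "PLT".toList (pvRepl "Total RBC".toList "RBC".toList (pvRepl "Haemoglobin".toList "Hb".toList s)))))) le_rfl).symm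
      _ = pvScan ([] : List (List Char × List Char)) (pvRepl "Haematocrit".toList "Hct".toList (pvRepl "Eosinophils".toList "Eos".toList (pvRepl "Monocytes".toList "Mono".toList (pvRepl "Lymphocytes".toList "Lymph".toList (pvRepl "Neutrophils".toList "Neut".toList (pvRepl "Platelets".toList "PLT".toList (pvRepl "Total RBC".toList "RBC".toList (pvRepl "Haemoglobin".toList "Hb".toList s)))))))) :=
        (pvStep "Haematocrit".toList "Hct".toList ([] : List (List Char × List Char)) (by decide) (by decide)
          (by decide) (by decide) (by decide) (by decide) ((pvRepl "Eosinophils".toList "Eos".toList (pvRepl "Monocytes".toList "Mono".toList (pvRepl "Lymphocytes".toList "Lymph".toList (pvRepl "Neutrophils".toList "Neut".toList (pvRepl "Platelets".toList "PLT".toList (pvRepl "Total RBC".toList "RBC".toList (pvRepl "Haemoglobin".toList "Hb".toList s)))))))).length (pvRepl "Eosinophils".toList "Eos".toList (pvRepl "Monocytes".toList "Mono".toList (pvRepl "Lymphocytes".toList "Lymph".toList (pvRepl "Neutrophils".toList "Neut".toList (pvRepl "Platelets".toList "PLT".toList (pvRepl "Total RBC".toList "RBC".toList (pvRepl "Haemoglobin".toList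 "Hb".toList s))))))) le_rfl).symm
      _ = (pvRepl "Haematocrit".toList "Hct".toList (pvRepl "Eosinophils".toList "Eos".toList (pvRepl "Monocytes".toList "Mono".toList (pvRepl "Lymphocytes".toList "Lymph".toList (pvRepl "Neutrophils".toList "Neut".toList (pvRepl "Platelets".toList "PLT".toList (pvRepl "Total RBC".toList "RBC".toList (pvRepl "Haemoglobin".toList "Hb".toList s)))))))) := pvScan_nil_table _

-- ===== VERDICT (by name: the statement is the Claim_ definition above) =====
theorem augment_report_abbreviations_spec : Claim_equal_augment_report_abbreviations := by
  intro text _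
  unfold Spec_augment_report_abbreviations augment_report_abbreviations augment_report_abbreviations_alt
  have hitems : (PySem.Dict.ofList [("Haemoglobin", "Hb"), ("Total RBC", "RBC"), ("Platelets", "PLT"), ("Neutrophils", "Neut"), ("Lymphocytes", "Lymph"), ("Monocytes", "Mono"), ("Eosinophils", "Eos"), ("Haematocrit", "Hct")] : PySem.Dict String String).items = [("Haemoglobin", "Hb"), ("Total RBC", "RBC"), ("Platelets", "PLT"), ("Neutrophils", "Neut"), ("Lymphocytes", "Lymph"), ("Monocytes", "Mono"), ("Eosinophils", "Eos"), ("Haematocrit", "Hct")] := by decide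
  simp only [hitems, List.foldl_cons, List.foldl_nil, PySem.Str.replace, String.toList_ofList]
  rw [pvReplace_eq "Haemoglobin".toList "Hb".toList _ (by decide),
    pvReplace_eq "Total RBC".toList "RBC".toList _ (by decide),
    pvReplace_eq "Platelets".toList "PLT".toList _ (by decide),
    pvReplace_eq "Neutrophils".toList "Neut".toList _ (by decide),
    pvReplace_eq "Lymphocytes".toList "Lymph".toList _ (by decide),
    pvReplace_eq "Monocytes".toList "Mono".toList _ (by decide),
    pvReplace_eq "Eosinophils".toList "Eos".toList _ (by decide),
    pvReplace_eq "Haematocrit".toList "Hct".toList _ (by decide)]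
  rw [pvChain]
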